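-- pv_equiv track=rewrite | github.com/NIVASPONTHAPALLI/codemind-python | absolute_difference_of_small_and_large.py | small
-- ===== SOURCE A (Python) =====
-- def small(n):
--     l=[]
--     for i in n:
--         l.append(ord(i))
--     l1=max(l)
--     l2=min(l)
--     l3=abs(l1-l2)
--     return l3
-- ===== SOURCE B (Python) =====
-- def small(n):
--     lo = hi = None
--     for i in n:
--         o = ord(i)
--         if lo is None:
--             lo = hi = o
--         else:
--             if o < lo:
--                 lo = o
--             if o > hi:
--                 hi = o
--     if lo is None:
--         raise ValueError("small() arg is an empty sequence")
--     return hi - lo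
-- ===== Notes on version B (the rewrite author's own statement) =====
-- stated objective: simpler
-- what changed: B replaces A's materialised ord-list plus separate max() and min() passes by a single streaming pass that tracks the running low/high pair and returns hi - lo (nonnegative by construction, so no abs).
import Mathlib
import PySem

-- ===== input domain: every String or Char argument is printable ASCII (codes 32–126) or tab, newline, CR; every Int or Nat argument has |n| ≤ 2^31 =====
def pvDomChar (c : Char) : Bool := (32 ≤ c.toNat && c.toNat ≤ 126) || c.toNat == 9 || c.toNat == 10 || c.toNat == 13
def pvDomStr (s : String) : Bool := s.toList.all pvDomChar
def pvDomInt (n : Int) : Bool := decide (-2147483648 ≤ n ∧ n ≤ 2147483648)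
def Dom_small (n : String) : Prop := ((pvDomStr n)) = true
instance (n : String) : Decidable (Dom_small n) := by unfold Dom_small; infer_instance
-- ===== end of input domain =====

-- B replaces A's ord-list + separate max()/min() passes by one streaming low/high pass (simpler, O(1) space).
-- Pre_small excludes the empty string, on which both A and B raise ValueError.


-- ===== PORT A =====
-- l = []; for i in n: l.append(ord(i)); l1 = max(l); l2 = min(l); return abs(l1 - l2)
def small (n : String) : Int :=
  let l : List Int := n.toList.foldl (fun acc c => acc ++ [(c.toNat : Int)]) []
  let l1 : Int := (PySem.List.max? l (fun x => x)).getD 0   -- max([]) raises: excluded by Pre_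
  let l2 : Int := (PySem.List.min? l (fun x => x)).getD 0
  |l1 - l2|

-- ===== PORT B =====
-- single pass keeping the running (lo, hi) pair; None until the first element
def smallStep (st : Option (Int × Int)) (c : Char) : Option (Int × Int) :=
  let o : Int := c.toNat
  match st with
  | none => some (o, o)
  | some (lo, hi) => some (min lo o, max hi o)

def small_alt (n : String) : Int :=
  match n.toList.foldl smallStep none with
  | none => 0          -- Source B raises ValueError here: excluded by Pre_
  | some (lo, hi) => hi - lo

-- ===== PRECONDITION & SPEC =====
-- Pre_ excludes only the empty string, on which both Pythons raise ValueError.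
def Pre_small (n : String) : Prop := n ≠ ""
instance (n : String) : Decidable (Pre_small n) := by unfold Pre_small; infer_instance
def pvWitness_small : String := ("ab")
def Spec_small (n : String) (out : Int) : Prop := out = small_alt n
instance (n : String) (out : Int) : Decidable (Spec_small n out) := by unfold Spec_small; infer_instance

-- ===== CLAIM (what is proved, stated in full; the proofs are below) =====
def Claim_equal_small : Prop := ∀ (n : String), Dom_small n → Pre_small n → Spec_small n (small n)

-- ===== LEMMAS AND PROOFS =====

theorem foldl_append_map (l : List Char) (acc : List Int) :
    l.foldl (fun acc c => acc ++ [(c.toNat : Int)]) acc = acc ++ l.map (fun c => (c.toNat : Int)) := by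
  induction l generalizing acc with
  | nil => simp
  | cons c t ih => simp [List.foldl, ih]

theorem foldl_smallStep_some (t : List Char) (lo hi : Int) :
    t.foldl smallStep (some (lo, hi)) =
      some ((t.map (fun c => (c.toNat : Int))).foldl min lo,
            (t.map (fun c => (c.toNat : Int))).foldl max hi) := by
  induction t generalizing lo hi with
  | nil => simp
  | cons c t ih => simp [List.foldl, smallStep, ih]

-- ===== VERDICT (by name: the statement is the Claim_ definition above) =====
theorem small_spec : Claim_equal_small := by
  intro n _ hpre
  unfold Spec_small small small_alt
  have hne : n.toList ≠ [] := by
    intro h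
    exact hpre (by exact String.ext h)
  cases hl : n.toList with
  | nil => exact absurd hl hne
  | cons c t =>
    simp only [foldl_append_map, List.nil_append, List.foldl,
      List.singleton_append, PySem.List.max?_id_cons, PySem.List.min?_id_cons,
      foldl_smallStep_some, smallStep, Option.getD]
    have hmin := (PySem.List.foldl_min_le (t.map (fun c => (c.toNat : Int))) (c.toNat : Int)).1
    have hmax := (PySem.List.le_foldl_max (t.map (fun c => (c.toNat : Int))) (c.toNat : Int)).1
    rw [abs_of_nonneg (by omega)]
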